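-- pv_equiv track=rewrite | github.com/kirillbk/Advent-of-code | 16/solution.py | part2
-- ===== SOURCE A (Python) =====
-- def _solve(
--         contraption: tuple[str],
--         # beam start
--         x: int = 0,
--         y: int = 0,
--         # beam direction
--         dx: int = 1,
--         dy: int = 0
--     ) -> int:
--     def beam(x: int, y: int, dx: int, dy: int):
--         if x < 0 or x >= len(contraption[0]) or y < 0 or y >= len(contraption):
--             return
--         if (x, y, dx, dy) in energized:
--             return
--
--         energized.add((x, y, dx, dy))
--         match contraption[y][x]:
--             case '.':
--                 beam(x + dx, y + dy, dx, dy)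
--             case '-':
--                 if dy == 0:
--                     beam(x + dx, y, dx, dy)
--                 else:
--                     beam(x + 1, y, 1, 0)
--                     beam(x - 1, y, -1, 0)
--             case '|':
--                 if dx == 0:
--                     beam(x, y + dy, dx, dy)
--                 else:
--                     beam(x, y + 1, 0, 1)
--                     beam(x, y - 1, 0, -1)
--             case '/':
--                 beam(x - dy, y - dx, -dy, -dx)
--             case '\\':
--                 beam(x + dy, y + dx, dy, dx)
--             case _:
--                 raise ValueError
--
--     energized = set()
--     beam(x, y, dx, dy)
--     energized = {(x, y) for x, y, *_ in energized}
--
--     return len(energized)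
--
-- def part2(contraption: tuple[str]) -> int:
--     energized = []
--     max_x = len(contraption[0]) - 1
--     max_y = len(contraption) -1
--
--     for y in range(len(contraption)):
--         energized.append(
--             _solve(contraption, 0, y, 1, 0)
--         )
--         energized.append(
--             _solve(contraption, max_x, y, -1, 0)
--         )
--     for x in range(len(contraption[0])):
--         energized.append(
--             _solve(contraption, x, 0, 0, 1)
--         )
--         energized.append(
--             _solve(contraption, x, max_y, 0, -1)
--         )
--
--     return max(energized)
-- ===== SOURCE B (Python) =====
-- def part2(contraption):
--     h = len(contraption)
--     w = len(contraption[0])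
--
--     def solve(x, y, dx, dy):
--         energized = set()
--         stack = [(x, y, dx, dy)]
--         while stack:
--             px, py, pdx, pdy = stack.pop()
--             if px < 0 or px >= w or py < 0 or py >= h or (px, py, pdx, pdy) in energized:
--                 continue
--             energized.add((px, py, pdx, pdy))
--             c = contraption[py][px]
--             # pop() takes from the end, so the second child of a split is pushed first
--             if c == '.':
--                 stack.append((px + pdx, py + pdy, pdx, pdy))
--             elif c == '-':
--                 if pdy == 0:
--                     stack.append((px + pdx, py, pdx, pdy))
--                 else:
--                     stack.append((px - 1, py, -1, 0))
--                     stack.append((px + 1, py, 1, 0))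
--             elif c == '|':
--                 if pdx == 0:
--                     stack.append((px, py + pdy, pdx, pdy))
--                 else:
--                     stack.append((px, py - 1, 0, -1))
--                     stack.append((px, py + 1, 0, 1))
--             elif c == '/':
--                 stack.append((px - pdy, py - pdx, -pdy, -pdx))
--             elif c == '\\':
--                 stack.append((px + pdy, py + pdx, pdy, pdx))
--             else:
--                 raise ValueError
--         return len({(px, py) for px, py, _, _ in energized})
--
--     best = 0
--     for y in range(h):
--         best = max(best, solve(0, y, 1, 0), solve(w - 1, y, -1, 0))
--     for x in range(w):
--         best = max(best, solve(x, 0, 0, 1), solve(x, h - 1, 0, -1))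
--     return best
-- ===== Notes on version B (the rewrite author's own statement) =====
-- stated objective: alternative
-- what changed: A's recursive beam DFS (closure recursion per split) is replaced by an iterative explicit-stack worklist over the same (x,y,dx,dy) states, and A's append-all-counts-then-max(list) by a running maximum over the four border-entry loops.
-- outside the precondition, e.g. on part2(('.-.', '|X|', '.-.')): A returns 3, B returns 3
import Mathlib
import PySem

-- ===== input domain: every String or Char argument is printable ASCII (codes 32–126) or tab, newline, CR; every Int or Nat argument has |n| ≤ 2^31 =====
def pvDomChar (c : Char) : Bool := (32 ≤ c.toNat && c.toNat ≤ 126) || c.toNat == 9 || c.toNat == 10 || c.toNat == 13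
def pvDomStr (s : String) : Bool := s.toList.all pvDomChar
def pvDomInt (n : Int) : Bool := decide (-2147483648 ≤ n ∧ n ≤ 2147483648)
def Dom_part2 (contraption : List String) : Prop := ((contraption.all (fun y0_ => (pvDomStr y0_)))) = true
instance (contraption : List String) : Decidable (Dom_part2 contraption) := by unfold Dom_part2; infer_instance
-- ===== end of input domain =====

-- B replaces A's recursive beam DFS by an iterative explicit-stack worklist and the
-- collected-list-then-max by a running maximum; same asymptotic cost ("alternative").

-- ===== PORT A =====

-- len(contraption[0]) resp. len(contraption), as used by A's bounds checks
def gridW (g : List String) : Int := (PySem.Str.len ((PySem.List.pyGet? g 0).getD "") : Int)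
def gridH (g : List String) : Int := (g.length : Int)

-- contraption[y][x] (none = index out of range)
def pvCell (g : List String) (x y : Int) : Option Char :=
  match PySem.List.pyGet? g y with
  | some row => PySem.Str.pyGet? row x
  | none => none

-- A's recursive `beam`, with a fuel guard for totality only (each recursive call first
-- inserts a fresh state, so recursion depth is bounded by the state count; solveA passes
-- enough fuel).
def beamA (g : List String) (w h : Int) : Nat → Int → Int → Int → Int →
    PySem.Set (Int × Int × Int × Int) → PySem.Set (Int × Int × Int × Int)
  | 0, _, _, _, _, v => v
  | Nat.succ n, x, y, dx, dy, v =>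
    if x < 0 ∨ w ≤ x ∨ y < 0 ∨ h ≤ y then v
    else if PySem.Set.contains v (x, y, dx, dy) = true then v
    else
      let v' := PySem.Set.add v (x, y, dx, dy)
      match pvCell g x y with
      | some c =>
        if c = '.' then beamA g w h n (x + dx) (y + dy) dx dy v'
        else if c = '-' then
          if dy = 0 then beamA g w h n (x + dx) y dx dy v'
          else beamA g w h n (x - 1) y (-1) 0 (beamA g w h n (x + 1) y 1 0 v')
        else if c = '|' then
          if dx = 0 then beamA g w h n x (y + dy) dx dy v'
          else beamA g w h n x (y - 1) 0 (-1) (beamA g w h n x (y + 1) 0 1 v')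
        else if c = '/' then beamA g w h n (x - dy) (y - dx) (-dy) (-dx) v'
        else if c = '\\' then beamA g w h n (x + dy) (y + dx) dy dx v'
        else v'  -- ValueError in Python: excluded by Pre_part2
      | none => v'  -- IndexError (row shorter than the first): excluded by Pre_part2

-- A's _solve
def solveA (g : List String) (x y dx dy : Int) : Int :=
  ((PySem.Set.ofList
    ((beamA g (gridW g) (gridH g) (9 * (gridW g).toNat * (gridH g).toNat + 1)
        x y dx dy PySem.Set.empty).map (fun s => (s.1, s.2.1)))).length : Int)

def part2 (contraption : List String) : Int :=
  (PySem.List.max?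
    ((PySem.List.pyRange 0 (gridW contraption)).foldl
      (fun acc x => (acc ++ [solveA contraption x 0 0 1]) ++
        [solveA contraption x (gridH contraption - 1) 0 (-1)])
      ((PySem.List.pyRange 0 (gridH contraption)).foldl
        (fun acc y => (acc ++ [solveA contraption 0 y 1 0]) ++
          [solveA contraption (gridW contraption - 1) y (-1) 0]) []))
    (fun v => v)).getD 0

-- ===== PORT B =====

-- B's iterative worklist (stack top = list head; fuel guard for totality only:
-- every iteration pops one entry, and pushes — each preceded by a fresh insert — at most two).
def dfsB (g : List String) (w h : Int) : Nat → List (Int × Int × Int × Int) →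
    PySem.Set (Int × Int × Int × Int) → PySem.Set (Int × Int × Int × Int)
  | 0, _, v => v
  | Nat.succ n, stack, v =>
    match stack with
    | [] => v
    | (x, y, dx, dy) :: rest =>
      if x < 0 ∨ w ≤ x ∨ y < 0 ∨ h ≤ y ∨ PySem.Set.contains v (x, y, dx, dy) = true then
        dfsB g w h n rest v
      else
        let v' := PySem.Set.add v (x, y, dx, dy)
        let pushed : List (Int × Int × Int × Int) :=
          match pvCell g x y with
          | some c =>
            if c = '.' then [(x + dx, y + dy, dx, dy)]
            else if c = '-' then
              if dy = 0 then [(x + dx, y, dx, dy)]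
              else [(x + 1, y, 1, 0), (x - 1, y, -1, 0)]
            else if c = '|' then
              if dx = 0 then [(x, y + dy, dx, dy)]
              else [(x, y + 1, 0, 1), (x, y - 1, 0, -1)]
            else if c = '/' then [(x - dy, y - dx, -dy, -dx)]
            else if c = '\\' then [(x + dy, y + dx, dy, dx)]
            else []  -- ValueError in Python B: excluded by Pre_part2
          | none => []  -- IndexError: excluded by Pre_part2
        dfsB g w h n (pushed ++ rest) v'

-- B's solve
def solveB (g : List String) (x y dx dy : Int) : Int :=
  ((PySem.Set.ofList
    ((dfsB g (gridW g) (gridH g) (18 * (gridW g).toNat * (gridH g).toNat + 2)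
        [(x, y, dx, dy)] PySem.Set.empty).map (fun s => (s.1, s.2.1)))).length : Int)

def part2_alt (contraption : List String) : Int :=
  (PySem.List.pyRange 0 (gridW contraption)).foldl
    (fun best x => max (max best (solveB contraption x 0 0 1))
      (solveB contraption x (gridH contraption - 1) 0 (-1)))
    ((PySem.List.pyRange 0 (gridH contraption)).foldl
      (fun best y => max (max best (solveB contraption 0 y 1 0))
        (solveB contraption (gridW contraption - 1) y (-1) 0)) 0)

-- ===== PRECONDITION & SPEC =====
-- Pre_ excludes the empty grid (A raises IndexError on contraption[0]), grids with a row
-- shorter than the first (A raises IndexError when a beam crosses the missing cells; the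
-- rare such grids whose short tails no beam reaches are excluded too, although A returns
-- there), and grids with a character outside ".-|/\" in the first len(contraption[0])
-- columns (A raises ValueError as soon as a beam reaches it; grids whose bad characters
-- are unreachable are excluded too, although A returns a value there).
def Pre_part2 (contraption : List String) : Prop :=
  contraption ≠ [] ∧
  ∀ s ∈ contraption,
    (contraption.headD "").toList.length ≤ s.toList.length ∧
    ((s.toList.take (contraption.headD "").toList.length).all
      (fun c => c == '.' || c == '-' || c == '|' || c == '/' || c == '\\')) = true
instance (contraption : List String) : Decidable (Pre_part2 contraption) := by
  unfold Pre_part2; infer_instance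

def pvWitness_part2 : List String := ["..", "/-"]

def Spec_part2 (contraption : List String) (out : Int) : Prop := out = part2_alt contraption
instance (contraption : List String) (out : Int) : Decidable (Spec_part2 contraption out) := by
  unfold Spec_part2; infer_instance

-- ===== CLAIM (what is proved, stated in full; the proofs are below) =====
def Claim_equal_part2 : Prop := ∀ (contraption : List String), Dom_part2 contraption →
  Pre_part2 contraption → Spec_part2 contraption (part2 contraption)

-- ===== LEMMAS AND PROOFS =====

-- directions ever fed to beam/the worklist
abbrev pvDir (dx dy : Int) : Prop :=
  (dx = -1 ∨ dx = 0 ∨ dx = 1) ∧ (dy = -1 ∨ dy = 0 ∨ dy = 1)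

-- all states with in-bounds position and small direction components
def pvAll (w h : Int) : List (Int × Int × Int × Int) :=
  (List.range w.toNat).flatMap fun xi =>
    (List.range h.toNat).flatMap fun yi =>
      ([-1, 0, 1] : List Int).flatMap fun dx =>
        ([-1, 0, 1] : List Int).map fun dy => ((xi : Int), (yi : Int), dx, dy)

lemma mem_pvAll {w h x y dx dy : Int} :
    (x, y, dx, dy) ∈ pvAll w h ↔
      (0 ≤ x ∧ x < w ∧ 0 ≤ y ∧ y < h ∧ pvDir dx dy) := by
  constructor
  · intro hmem
    simp only [pvAll, List.mem_flatMap, List.mem_map] at hmem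
    obtain ⟨xi, hxi, yi, hyi, dx', hdx', dy', hdy', heq⟩ := hmem
    obtain ⟨xa, hxa, rfl⟩ : ∃ a : Nat, (a : Int) < w ∧ xi = (a : Int) := by simpa using hxi
    obtain ⟨ya, hya, rfl⟩ : ∃ a : Nat, (a : Int) < h ∧ yi = (a : Int) := by simpa using hyi
    obtain ⟨e1, e2, e3, e4⟩ :
        (xa : Int) = x ∧ (ya : Int) = y ∧ dx' = dx ∧ dy' = dy := by simpa using heq
    subst e3; subst e4
    simp only [List.mem_cons, List.not_mem_nil, or_false] at hdx' hdy'
    exact ⟨by omega, by omega, by omega, by omega, hdx', hdy'⟩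
  · rintro ⟨hx0, hxw, hy0, hyh, hdx, hdy⟩
    simp only [pvAll, List.mem_flatMap, List.mem_map]
    refine ⟨x, ?_, y, ?_, dx, ?_, dy, ?_, rfl⟩
    · have hx : ∃ a : Nat, (a : Int) < w ∧ x = (a : Int) := ⟨x.toNat, by omega, by omega⟩
      simpa using hx
    · have hy : ∃ a : Nat, (a : Int) < h ∧ y = (a : Int) := ⟨y.toNat, by omega, by omega⟩
      simpa using hy
    · rcases hdx with rfl | rfl | rfl <;> simp
    · rcases hdy with rfl | rfl | rfl <;> simp

-- the measure: number of candidate states not yet energized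
def pvC (w h : Int) (v : List (Int × Int × Int × Int)) : Nat :=
  ((pvAll w h).filter (fun s => decide (s ∉ v))).length

lemma pv_filter_le {α : Type} (l : List α) (p q : α → Bool)
    (himp : ∀ x, p x = true → q x = true) :
    (l.filter p).length ≤ (l.filter q).length := by
  induction l with
  | nil => simp
  | cons a t ih =>
    cases hpa : p a
    · cases hqa : q a <;> simp only [List.filter_cons, hpa, hqa] <;> simp <;> omega
    · have hqa : q a = true := himp a hpa
      simp only [List.filter_cons, hpa, hqa, if_true, List.length_cons]
      omega

lemma pv_filter_lt {α : Type} (l : List α) (p q : α → Bool)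
    (himp : ∀ x, p x = true → q x = true) (a : α) (ha : a ∈ l)
    (hq : q a = true) (hp : p a = false) :
    (l.filter p).length < (l.filter q).length := by
  induction l with
  | nil => cases ha
  | cons x t ih =>
    rcases List.mem_cons.1 ha with rfl | hat
    · simp only [List.filter_cons, hp, hq, if_true, Bool.false_eq_true, if_false,
        List.length_cons]
      have := pv_filter_le t p q himp
      omega
    · cases hpx : p x
      · cases hqx : q x
        · simpa [List.filter_cons, hpx, hqx] using ih hat
        · have := ih hat
          simp only [List.filter_cons, hpx, hqx, if_true, Bool.false_eq_true, if_false,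
            List.length_cons]
          omega
      · have hqx : q x = true := himp x hpx
        have := ih hat
        simp only [List.filter_cons, hpx, hqx, if_true, List.length_cons]
        omega

lemma pvC_mono {w h : Int} {v v' : List (Int × Int × Int × Int)} (hsub : v ⊆ v') :
    pvC w h v' ≤ pvC w h v := by
  unfold pvC
  refine pv_filter_le _ _ _ ?_
  intro x hx
  simp only [decide_eq_true_eq] at hx ⊢
  exact fun hm => hx (hsub hm)

lemma pvC_add_lt {w h : Int} {v : List (Int × Int × Int × Int)}
    {s : Int × Int × Int × Int} (hmem : s ∈ pvAll w h) (hnot : s ∉ v) :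
    pvC w h (v ++ [s]) < pvC w h v := by
  refine pv_filter_lt _ _ _ ?_ s hmem (by simpa using hnot) (by simp)
  intro x hx
  simp only [decide_eq_true_eq, List.mem_append] at hx ⊢
  exact fun hm => hx (Or.inl hm)

-- children of a live state, in the order A recurses on them / B pops them
def pvKids (g : List String) (x y dx dy : Int) : List (Int × Int × Int × Int) :=
  match pvCell g x y with
  | some c =>
    if c = '.' then [(x + dx, y + dy, dx, dy)]
    else if c = '-' then
      if dy = 0 then [(x + dx, y, dx, dy)]
      else [(x + 1, y, 1, 0), (x - 1, y, -1, 0)]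
    else if c = '|' then
      if dx = 0 then [(x, y + dy, dx, dy)]
      else [(x, y + 1, 0, 1), (x, y - 1, 0, -1)]
    else if c = '/' then [(x - dy, y - dx, -dy, -dx)]
    else if c = '\\' then [(x + dy, y + dx, dy, dx)]
    else []
  | none => []

lemma pvKids_len (g : List String) (x y dx dy : Int) :
    (pvKids g x y dx dy).length ≤ 2 := by
  unfold pvKids
  rcases pvCell g x y with _ | c
  · simp
  · by_cases h1 : c = '.'
    · simp [h1]
    · by_cases h2 : c = '-'
      · by_cases h6 : dy = 0 <;> simp [h1, h2, h6]
      · by_cases h3 : c = '|'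
        · by_cases h7 : dx = 0 <;> simp [h1, h2, h3, h7]
        · by_cases h4 : c = '/'
          · simp [h1, h2, h3, h4]
          · by_cases h5 : c = '\\' <;> simp [h1, h2, h3, h4, h5]

lemma pvKids_dir {g : List String} {x y dx dy : Int} (hd : pvDir dx dy) :
    ∀ k ∈ pvKids g x y dx dy, pvDir k.2.2.1 k.2.2.2 := by
  obtain ⟨hdx, hdy⟩ := hd
  intro k hk
  unfold pvKids at hk
  revert hk
  rcases pvCell g x y with _ | c
  · intro hk; simp at hk
  · by_cases h1 : c = '.'
    · intro hk; simp [h1] at hk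
      subst hk; refine ⟨?_, ?_⟩ <;> (try simp) <;> omega
    · by_cases h2 : c = '-'
      · by_cases h6 : dy = 0
        · intro hk; simp [h1, h2, h6] at hk
          subst hk; refine ⟨?_, ?_⟩ <;> (try simp) <;> omega
        · intro hk; simp [h1, h2, h6] at hk
          rcases hk with rfl | rfl <;> refine ⟨?_, ?_⟩ <;> (try simp) <;> omega
      · by_cases h3 : c = '|'
        · by_cases h7 : dx = 0
          · intro hk; simp [h1, h2, h3, h7] at hk
            subst hk; refine ⟨?_, ?_⟩ <;> (try simp) <;> omega
          · intro hk; simp [h1, h2, h3, h7] at hk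
            rcases hk with rfl | rfl <;> refine ⟨?_, ?_⟩ <;> (try simp) <;> omega
        · by_cases h4 : c = '/'
          · intro hk; simp [h1, h2, h3, h4] at hk
            subst hk; refine ⟨?_, ?_⟩ <;> (try simp) <;> omega
          · by_cases h5 : c = '\\'
            · intro hk; simp [h1, h2, h3, h4, h5] at hk
              subst hk; refine ⟨?_, ?_⟩ <;> (try simp) <;> omega
            · intro hk; simp [h1, h2, h3, h4, h5] at hk

lemma beamA_stop {g : List String} {w h : Int} (n : Nat) {x y dx dy : Int}
    {v : PySem.Set (Int × Int × Int × Int)}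
    (hst : (x < 0 ∨ w ≤ x ∨ y < 0 ∨ h ≤ y) ∨ (x, y, dx, dy) ∈ v) :
    beamA g w h (n + 1) x y dx dy v = v := by
  rcases hst with hb | hm
  · simp only [beamA, if_pos hb]
  · simp only [beamA]
    by_cases hb : (x < 0 ∨ w ≤ x ∨ y < 0 ∨ h ≤ y)
    · rw [if_pos hb]
    · rw [if_neg hb, if_pos ((PySem.Set.contains_iff v _).2 hm)]

lemma beamA_go {g : List String} {w h : Int} (n : Nat) {x y dx dy : Int}
    {v : PySem.Set (Int × Int × Int × Int)}
    (hb : ¬(x < 0 ∨ w ≤ x ∨ y < 0 ∨ h ≤ y)) (hm : (x, y, dx, dy) ∉ v) :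
    beamA g w h (n + 1) x y dx dy v =
      (pvKids g x y dx dy).foldl
        (fun acc k => beamA g w h n k.1 k.2.1 k.2.2.1 k.2.2.2 acc)
        (v ++ [(x, y, dx, dy)]) := by
  have hc : ¬ PySem.Set.contains v (x, y, dx, dy) = true := by
    rw [PySem.Set.contains_iff]; exact hm
  simp only [beamA, if_neg hb, if_neg hc, PySem.Set.add_of_not_mem hm]
  unfold pvKids
  rcases pvCell g x y with _ | c
  · simp
  · by_cases h1 : c = '.'
    · simp [h1]
    · by_cases h2 : c = '-'
      · by_cases h6 : dy = 0 <;> simp [h1, h2, h6]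
      · by_cases h3 : c = '|'
        · by_cases h7 : dx = 0 <;> simp [h1, h2, h3, h7]
        · by_cases h4 : c = '/'
          · simp [h1, h2, h3, h4]
          · by_cases h5 : c = '\\' <;> simp [h1, h2, h3, h4, h5]

lemma dfsB_skip {g : List String} {w h : Int} (n : Nat) {x y dx dy : Int}
    {rest : List (Int × Int × Int × Int)} {v : PySem.Set (Int × Int × Int × Int)}
    (hst : (x < 0 ∨ w ≤ x ∨ y < 0 ∨ h ≤ y) ∨ (x, y, dx, dy) ∈ v) :
    dfsB g w h (n + 1) ((x, y, dx, dy) :: rest) v = dfsB g w h n rest v := by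
  simp only [dfsB]
  rw [if_pos]
  rcases hst with hb | hm
  · tauto
  · exact Or.inr (Or.inr (Or.inr (Or.inr ((PySem.Set.contains_iff v _).2 hm))))

lemma dfsB_go {g : List String} {w h : Int} (n : Nat) {x y dx dy : Int}
    {rest : List (Int × Int × Int × Int)} {v : PySem.Set (Int × Int × Int × Int)}
    (hb : ¬(x < 0 ∨ w ≤ x ∨ y < 0 ∨ h ≤ y)) (hm : (x, y, dx, dy) ∉ v) :
    dfsB g w h (n + 1) ((x, y, dx, dy) :: rest) v =
      dfsB g w h n (pvKids g x y dx dy ++ rest) (v ++ [(x, y, dx, dy)]) := by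
  simp only [dfsB]
  rw [if_neg]
  · simp only [PySem.Set.add_of_not_mem hm]
    unfold pvKids
    rfl
  · intro hcon
    rcases hcon with hh | hh | hh | hh | hh
    · exact hb (Or.inl hh)
    · exact hb (Or.inr (Or.inl hh))
    · exact hb (Or.inr (Or.inr (Or.inl hh)))
    · exact hb (Or.inr (Or.inr (Or.inr hh)))
    · exact hm ((PySem.Set.contains_iff v _).1 hh)

lemma pv_foldl_subset {g : List String} {w h : Int} (n : Nat)
    (IH : ∀ (x y dx dy : Int) (v : PySem.Set (Int × Int × Int × Int)),
      v ⊆ beamA g w h n x y dx dy v) :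
    ∀ (ks : List (Int × Int × Int × Int)) (u : PySem.Set (Int × Int × Int × Int)),
      u ⊆ ks.foldl (fun acc k => beamA g w h n k.1 k.2.1 k.2.2.1 k.2.2.2 acc) u := by
  intro ks
  induction ks with
  | nil => intro u; simp
  | cons k t iht =>
    intro u
    simp only [List.foldl_cons]
    exact (IH _ _ _ _ u).trans (iht _)

lemma beamA_subset (g : List String) (w h : Int) :
    ∀ (n : Nat) (x y dx dy : Int) (v : PySem.Set (Int × Int × Int × Int)),
      v ⊆ beamA g w h n x y dx dy v := by
  intro n
  induction n with
  | zero => intro x y dx dy v; simp [beamA]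
  | succ n ih =>
    intro x y dx dy v
    by_cases hst : (x < 0 ∨ w ≤ x ∨ y < 0 ∨ h ≤ y) ∨ (x, y, dx, dy) ∈ v
    · rw [beamA_stop n hst]
      exact fun a ha => ha
    · have hb : ¬(x < 0 ∨ w ≤ x ∨ y < 0 ∨ h ≤ y) := fun hh => hst (Or.inl hh)
      have hm : (x, y, dx, dy) ∉ v := fun hh => hst (Or.inr hh)
      rw [beamA_go n hb hm]
      have base : v ⊆ v ++ [(x, y, dx, dy)] := fun a ha => List.mem_append.2 (Or.inl ha)
      exact base.trans (pv_foldl_subset n ih _ _)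

lemma pv_foldl_irrel {g : List String} {w h : Int} (n m : Nat)
    (IH : ∀ (m' : Nat) (x y dx dy : Int) (v : PySem.Set (Int × Int × Int × Int)),
      pvDir dx dy → pvC w h v < n → pvC w h v < m' →
      beamA g w h n x y dx dy v = beamA g w h m' x y dx dy v) :
    ∀ (ks : List (Int × Int × Int × Int)) (u : PySem.Set (Int × Int × Int × Int)),
      (∀ k ∈ ks, pvDir k.2.2.1 k.2.2.2) → pvC w h u < n → pvC w h u < m →
      ks.foldl (fun acc k => beamA g w h n k.1 k.2.1 k.2.2.1 k.2.2.2 acc) u =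
      ks.foldl (fun acc k => beamA g w h m k.1 k.2.1 k.2.2.1 k.2.2.2 acc) u := by
  intro ks
  induction ks with
  | nil => intro u _ _ _; rfl
  | cons k t iht =>
    intro u hdk hun hum
    simp only [List.foldl_cons]
    have hk := hdk k (by simp)
    have h1 : beamA g w h n k.1 k.2.1 k.2.2.1 k.2.2.2 u =
        beamA g w h m k.1 k.2.1 k.2.2.1 k.2.2.2 u := IH m _ _ _ _ u hk hun hum
    rw [← h1]
    have hsub : pvC w h (beamA g w h n k.1 k.2.1 k.2.2.1 k.2.2.2 u) ≤ pvC w h u :=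
      pvC_mono (beamA_subset g w h n _ _ _ _ u)
    exact iht _ (fun k' hk' => hdk k' (List.mem_cons_of_mem _ hk')) (by omega) (by omega)

lemma beamA_irrel {g : List String} {w h : Int} :
    ∀ (n m : Nat) (x y dx dy : Int) (v : PySem.Set (Int × Int × Int × Int)),
      pvDir dx dy → pvC w h v < n → pvC w h v < m →
      beamA g w h n x y dx dy v = beamA g w h m x y dx dy v := by
  intro n
  induction n with
  | zero => intro m x y dx dy v _ hn; omega
  | succ n ih =>
    intro m x y dx dy v hd hn hm
    rcases m with _ | m
    · omega
    by_cases hst : (x < 0 ∨ w ≤ x ∨ y < 0 ∨ h ≤ y) ∨ (x, y, dx, dy) ∈ v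
    · rw [beamA_stop n hst, beamA_stop m hst]
    · have hb : ¬(x < 0 ∨ w ≤ x ∨ y < 0 ∨ h ≤ y) := fun hh => hst (Or.inl hh)
      have hmem : (x, y, dx, dy) ∉ v := fun hh => hst (Or.inr hh)
      rw [beamA_go n hb hmem, beamA_go m hb hmem]
      have hmemAll : (x, y, dx, dy) ∈ pvAll w h := by
        rw [mem_pvAll]
        exact ⟨by omega, by omega, by omega, by omega, hd⟩
      have hlt : pvC w h (v ++ [(x, y, dx, dy)]) < pvC w h v := pvC_add_lt hmemAll hmem
      exact pv_foldl_irrel n m ih _ _ (pvKids_dir hd) (by omega) (by omega)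

-- idealised beam: beamA with exactly enough fuel
def pvBI (g : List String) (w h : Int) (x y dx dy : Int)
    (v : PySem.Set (Int × Int × Int × Int)) : PySem.Set (Int × Int × Int × Int) :=
  beamA g w h (pvC w h v + 1) x y dx dy v

lemma beamA_eq_pvBI {g : List String} {w h : Int} {n : Nat} {x y dx dy : Int}
    {v : PySem.Set (Int × Int × Int × Int)} (hd : pvDir dx dy) (hn : pvC w h v < n) :
    beamA g w h n x y dx dy v = pvBI g w h x y dx dy v :=
  beamA_irrel n (pvC w h v + 1) x y dx dy v hd hn (Nat.lt_succ_self _)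

lemma foldl_beam_eq_pvBI {g : List String} {w h : Int} (n : Nat) :
    ∀ (ks : List (Int × Int × Int × Int)) (u : PySem.Set (Int × Int × Int × Int)),
      (∀ k ∈ ks, pvDir k.2.2.1 k.2.2.2) → pvC w h u < n →
      ks.foldl (fun acc k => beamA g w h n k.1 k.2.1 k.2.2.1 k.2.2.2 acc) u =
      ks.foldl (fun acc k => pvBI g w h k.1 k.2.1 k.2.2.1 k.2.2.2 acc) u := by
  intro ks
  induction ks with
  | nil => intro u _ _; rfl
  | cons k t iht =>
    intro u hdk hu
    simp only [List.foldl_cons]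
    rw [beamA_eq_pvBI (hdk k (by simp)) hu]
    refine iht _ (fun k' hk' => hdk k' (List.mem_cons_of_mem _ hk')) ?_
    calc pvC w h (pvBI g w h k.1 k.2.1 k.2.2.1 k.2.2.2 u) ≤ pvC w h u :=
          pvC_mono (beamA_subset g w h _ _ _ _ _ u)
      _ < n := hu

lemma dfsB_eq_foldl {g : List String} {w h : Int} :
    ∀ (n : Nat) (stack : List (Int × Int × Int × Int))
      (v : PySem.Set (Int × Int × Int × Int)),
      (∀ s ∈ stack, pvDir s.2.2.1 s.2.2.2) →
      stack.length + 2 * pvC w h v < n →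
      dfsB g w h n stack v =
        stack.foldl (fun acc k => pvBI g w h k.1 k.2.1 k.2.2.1 k.2.2.2 acc) v := by
  intro n
  induction n with
  | zero => intro stack v _ hlt; omega
  | succ n ih =>
    intro stack v hdirs hlt
    rcases stack with _ | ⟨⟨x, y, dx, dy⟩, rest⟩
    · simp [dfsB]
    have hd : pvDir dx dy := hdirs (x, y, dx, dy) (by simp)
    by_cases hst : (x < 0 ∨ w ≤ x ∨ y < 0 ∨ h ≤ y) ∨ (x, y, dx, dy) ∈ v
    · rw [dfsB_skip n hst]
      have hstop : pvBI g w h x y dx dy v = v := beamA_stop _ hst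
      simp only [List.foldl_cons, hstop]
      refine ih rest v (fun s hs => hdirs s (List.mem_cons_of_mem _ hs)) ?_
      simp only [List.length_cons] at hlt
      omega
    · have hb : ¬(x < 0 ∨ w ≤ x ∨ y < 0 ∨ h ≤ y) := fun hh => hst (Or.inl hh)
      have hmem : (x, y, dx, dy) ∉ v := fun hh => hst (Or.inr hh)
      rw [dfsB_go n hb hmem]
      have hmemAll : (x, y, dx, dy) ∈ pvAll w h := by
        rw [mem_pvAll]
        exact ⟨by omega, by omega, by omega, by omega, hd⟩
      have hltC : pvC w h (v ++ [(x, y, dx, dy)]) < pvC w h v := pvC_add_lt hmemAll hmem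
      have hklen := pvKids_len g x y dx dy
      have hdk := pvKids_dir (g := g) (x := x) (y := y) hd
      rw [ih (pvKids g x y dx dy ++ rest) (v ++ [(x, y, dx, dy)])
        (by intro s hs
            rcases List.mem_append.1 hs with hs | hs
            · exact hdk s hs
            · exact hdirs s (List.mem_cons_of_mem _ hs))
        (by simp only [List.length_append, List.length_cons] at hlt ⊢; omega)]
      rw [List.foldl_append, List.foldl_cons]
      congr 1
      rw [show pvBI g w h x y dx dy v =
            (pvKids g x y dx dy).foldl
              (fun acc k => beamA g w h (pvC w h v) k.1 k.2.1 k.2.2.1 k.2.2.2 acc)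
              (v ++ [(x, y, dx, dy)]) from by
        rw [pvBI]; exact beamA_go (pvC w h v) hb hmem]
      exact (foldl_beam_eq_pvBI (g := g) (pvC w h v) _ _ hdk hltC).symm

lemma pv_len_flat_const {α β : Type} (l : List α) (f : α → List β) (c : Nat)
    (hc : ∀ a ∈ l, (f a).length = c) : (l.flatMap f).length = l.length * c := by
  induction l with
  | nil => simp
  | cons a t ih =>
    simp only [List.flatMap_cons, List.length_append, List.length_cons,
      hc a (by simp), ih (fun a ha => hc a (List.mem_cons_of_mem _ ha))]
    ring

lemma pvC_empty (w h : Int) :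
    pvC w h (PySem.Set.empty : PySem.Set (Int × Int × Int × Int)) =
      w.toNat * h.toNat * 9 := by
  unfold pvC
  have heq : ((pvAll w h).filter
      (fun s => decide (s ∉ (PySem.Set.empty : PySem.Set (Int × Int × Int × Int))))).length =
      (pvAll w h).length := by
    rw [List.filter_eq_self.2]
    intro a _
    simp [PySem.Set.empty]
  rw [heq]
  unfold pvAll
  rw [pv_len_flat_const _ _ (h.toNat * 9)]
  · simp [Nat.mul_assoc]
  · intro xi _
    rw [pv_len_flat_const _ _ 9]
    · simp
    · intro yi _
      simp [List.flatMap_cons]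

lemma solveB_eq_solveA (g : List String) (x y dx dy : Int) (hd : pvDir dx dy) :
    solveB g x y dx dy = solveA g x y dx dy := by
  unfold solveA solveB
  have hB := dfsB_eq_foldl (g := g) (w := gridW g) (h := gridH g)
    (18 * (gridW g).toNat * (gridH g).toNat + 2) [(x, y, dx, dy)] PySem.Set.empty
    (by intro s hs
        rw [List.mem_singleton] at hs
        subst hs
        exact hd)
    (by rw [pvC_empty, show 18 * (gridW g).toNat * (gridH g).toNat =
          2 * ((gridW g).toNat * (gridH g).toNat * 9) from by ring]
        simp only [List.length_cons, List.length_nil]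
        linarith)
  have hA := beamA_eq_pvBI (g := g) (w := gridW g) (h := gridH g)
    (n := 9 * (gridW g).toNat * (gridH g).toNat + 1)
    (x := x) (y := y) (dx := dx) (dy := dy) (v := PySem.Set.empty) hd
    (by rw [pvC_empty, show (gridW g).toNat * (gridH g).toNat * 9 =
          9 * (gridW g).toNat * (gridH g).toNat from by ring]
        omega)
  simp only [List.foldl_cons, List.foldl_nil] at hB
  rw [hB, hA]

lemma solveA_nonneg (g : List String) (x y dx dy : Int) : 0 ≤ solveA g x y dx dy := by
  unfold solveA
  exact Int.natCast_nonneg _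

lemma pv_maxpair_fold {α : Type} (l : List α) (f k : α → Int) (b : Int) :
    l.foldl (fun best a => max (max best (f a)) (k a)) b =
      List.foldl max b (l.flatMap fun a => [f a, k a]) := by
  induction l generalizing b with
  | nil => rfl
  | cons a t ih =>
    simp only [List.foldl_cons, List.flatMap_cons, List.foldl_append]
    exact ih _

-- ===== VERDICT (by name: the statement is the Claim_ definition above) =====
theorem part2_spec : Claim_equal_part2 := by
  intro g _ hpre
  unfold Spec_part2 part2 part2_alt
  obtain ⟨hne, -⟩ := hpre
  have e1 : ∀ y : Int, solveB g 0 y 1 0 = solveA g 0 y 1 0 :=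
    fun y => solveB_eq_solveA g 0 y 1 0 ⟨by omega, by omega⟩
  have e2 : ∀ y : Int, solveB g (gridW g - 1) y (-1) 0 = solveA g (gridW g - 1) y (-1) 0 :=
    fun y => solveB_eq_solveA g _ y (-1) 0 ⟨by omega, by omega⟩
  have e3 : ∀ x : Int, solveB g x 0 0 1 = solveA g x 0 0 1 :=
    fun x => solveB_eq_solveA g x 0 0 1 ⟨by omega, by omega⟩
  have e4 : ∀ x : Int, solveB g x (gridH g - 1) 0 (-1) = solveA g x (gridH g - 1) 0 (-1) :=
    fun x => solveB_eq_solveA g x _ 0 (-1) ⟨by omega, by omega⟩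
  simp only [e1, e2, e3, e4]
  rw [show (fun (acc : List Int) (y : Int) => (acc ++ [solveA g 0 y 1 0]) ++
        [solveA g (gridW g - 1) y (-1) 0]) =
      (fun (acc : List Int) (y : Int) => acc ++
        [solveA g 0 y 1 0, solveA g (gridW g - 1) y (-1) 0]) from by
    funext acc y; simp]
  rw [show (fun (acc : List Int) (x : Int) => (acc ++ [solveA g x 0 0 1]) ++
        [solveA g x (gridH g - 1) 0 (-1)]) =
      (fun (acc : List Int) (x : Int) => acc ++
        [solveA g x 0 0 1, solveA g x (gridH g - 1) 0 (-1)]) from by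
    funext acc x; simp]
  rw [PySem.List.foldl_append_eq_flatMap, PySem.List.foldl_append_eq_flatMap,
    List.nil_append, pv_maxpair_fold, pv_maxpair_fold, ← List.foldl_append]
  obtain ⟨s, gs, rfl⟩ : ∃ s gs, g = s :: gs := by
    cases g with
    | nil => exact absurd rfl hne
    | cons s gs => exact ⟨s, gs, rfl⟩
  rw [show gridH (s :: gs) = ((gs.length + 1 : Nat) : Int) from by
    simp [gridH]]
  rw [PySem.List.pyRange_zero_natCast, List.range_succ_eq_map]
  simp only [List.map_cons, List.flatMap_cons, Nat.cast_zero, List.cons_append,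
    List.append_assoc]
  rw [PySem.List.max?_id_cons, Option.getD_some, List.foldl_cons, List.foldl_cons,
    List.foldl_cons, max_eq_right (solveA_nonneg (s :: gs) 0 0 1 0)]
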